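-- pv_equiv track=rewrite | github.com/msrgq/Bioinformatics | lab8/L8/Ex2.py | find_transposons
-- ===== SOURCE A (Python) =====
-- def find_transposons(sequence, transposons):
--     results = []
--     for te in transposons:
--         start = 0
--         while True:
--             idx = sequence.find(te, start)
--             if idx == -1:
--                 break
--             results.append((te, idx, idx + len(te)))
--             start = idx + 1
--     return results
-- ===== SOURCE B (Python) =====
-- def find_transposons(sequence, transposons):
--     n = len(sequence)
--     return [(te, i, i + len(te))
--             for te in transposons
--             for i in range(n - len(te) + 1)
--             if sequence[i:i + len(te)] == te]
-- ===== Notes on version B (the rewrite author's own statement) =====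
-- stated objective: alternative
-- what changed: A repeatedly calls str.find with a moving start index per pattern; B is a single comprehension that checks every alignment window by slice comparison, with no find/restart loop.
import Mathlib
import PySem

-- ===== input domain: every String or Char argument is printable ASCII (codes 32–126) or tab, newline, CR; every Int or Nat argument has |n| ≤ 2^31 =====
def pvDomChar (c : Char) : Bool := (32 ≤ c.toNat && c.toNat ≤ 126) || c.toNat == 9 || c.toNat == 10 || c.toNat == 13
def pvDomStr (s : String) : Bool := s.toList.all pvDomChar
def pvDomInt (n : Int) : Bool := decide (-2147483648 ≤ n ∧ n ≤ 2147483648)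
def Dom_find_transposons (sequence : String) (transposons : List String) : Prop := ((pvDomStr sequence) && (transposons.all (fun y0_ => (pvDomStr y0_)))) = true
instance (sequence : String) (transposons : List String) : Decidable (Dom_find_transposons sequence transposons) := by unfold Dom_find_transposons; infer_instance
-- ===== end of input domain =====

-- B replaces A's per-pattern str.find/restart loop by one comprehension that slice-compares
-- every alignment window (objective: alternative, same asymptotic cost).

-- ===== PORT A =====

-- findFrom with a start index past the end of the string returns -1 (needed for termination of the while loop).
theorem pvFindFrom_past_end (s sub : List Char) (k : Nat) (h : s.length < k) :
    PySem.Chars.findFrom s sub (k : Int) none = -1 := by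
  simp only [PySem.Chars.findFrom]
  have h1 : ¬ ((k : Int) < 0) := by omega
  rw [if_neg h1, if_pos (by exact_mod_cast h)]

-- bounds of a successful findFrom (needed for termination and for the equivalence proof)
theorem pvFindFrom_bounds (s sub : List Char) (k : Nat) (hk : k ≤ s.length)
    (h : PySem.Chars.findFrom s sub (k : Int) none ≠ -1) :
    k ≤ (PySem.Chars.findFrom s sub (k : Int) none).toNat ∧
      (PySem.Chars.findFrom s sub (k : Int) none).toNat + sub.length ≤ s.length := by
  obtain ⟨h1, h2, h3⟩ := PySem.Chars.findFrom_natCast_spec s sub k hk h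
  have hkr : k ≤ (PySem.Chars.findFrom s sub (k : Int) none).toNat := by omega
  refine ⟨hkr, ?_⟩
  by_cases hs : sub = []
  · have hnil : ¬ k < (PySem.Chars.findFrom s sub (k : Int) none).toNat := by
      intro hlt
      exact h3 k le_rfl hlt (hs ▸ List.nil_prefix)
    have hl : sub.length = 0 := by simp [hs]
    omega
  · have hlen := h2.length_le
    rw [List.length_drop] at hlen
    have hle : (PySem.Chars.findFrom s sub (k : Int) none).toNat ≤ s.length := by
      by_contra hgt
      have : s.drop (PySem.Chars.findFrom s sub (k : Int) none).toNat = [] :=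
        List.drop_eq_nil_of_le (by omega)
      rw [this] at h2
      exact hs (List.prefix_nil.mp h2)
    have : 1 ≤ sub.length := List.length_pos_iff.mpr hs
    omega

-- the 'while True: idx = sequence.find(te, start); if idx == -1: break; append; start = idx + 1' loop
def pvFindLoopA (s : List Char) (te : String) (start : Nat) : List (String × Int × Int) :=
  let idx := PySem.Chars.findFrom s te.toList (start : Int) none
  if h : idx = -1 then []
  else (te, idx, idx + (te.toList.length : Int)) :: pvFindLoopA s te (idx.toNat + 1)
termination_by s.length + 1 - start
decreasing_by
  have hk : start ≤ s.length := by
    by_contra hgt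
    exact h (pvFindFrom_past_end s te.toList start (by omega))
  have := pvFindFrom_bounds s te.toList start hk h
  omega

def find_transposons (sequence : String) (transposons : List String) : List (String × Int × Int) :=
  transposons.foldl (fun results te => results ++ pvFindLoopA sequence.toList te 0) []

-- ===== PORT B =====

-- the comprehension body: 'if sequence[i:i+len(te)] == te then yield (te, i, i+len(te))'
def pvSelB (s : List Char) (te : String) (i : Int) : Option (String × Int × Int) :=
  if PySem.Chars.slice s (some i) (some (i + (te.toList.length : Int))) = te.toList
  then some (te, i, i + (te.toList.length : Int)) else none

def find_transposons_alt (sequence : String) (transposons : List String) : List (String × Int × Int) :=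
  let n : Int := sequence.toList.length
  transposons.flatMap (fun te =>
    (PySem.List.pyRange 0 (n - (te.toList.length : Int) + 1) 1).filterMap (pvSelB sequence.toList te))

-- ===== PRECONDITION & SPEC =====
def Spec_find_transposons (sequence : String) (transposons : List String) (out : List (String × Int × Int)) : Prop := out = find_transposons_alt sequence transposons
instance (sequence : String) (transposons : List String) (out : List (String × Int × Int)) : Decidable (Spec_find_transposons sequence transposons out) := by unfold Spec_find_transposons; infer_instance

-- ===== CLAIM (what is proved, stated in full; the proofs are below) =====
def Claim_equal_find_transposons : Prop := ∀ (sequence : String) (transposons : List String), Dom_find_transposons sequence transposons → Spec_find_transposons sequence transposons (find_transposons sequence transposons)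

-- ===== LEMMAS AND PROOFS =====

theorem pvSelB_natCast (s : List Char) (te : String) (j : Nat) :
    pvSelB s te (j : Int) =
      if te.toList <+: s.drop j then some (te, (j : Int), (j : Int) + (te.toList.length : Int)) else none := by
  unfold pvSelB
  rw [show ((j : Int) + (te.toList.length : Int)) = ((j + te.toList.length : Nat) : Int) by push_cast; ring]
  simp only [PySem.Chars.slice, PySem.List.slice_natCast, Nat.add_sub_cancel_left]
  have hcond : ((s.drop j).take te.toList.length = te.toList) ↔ te.toList <+: s.drop j := by
    constructor
    · intro h; rw [← h]; exact List.take_prefix _ _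
    · intro h; exact (List.prefix_iff_eq_take.mp h).symm
  by_cases hp : te.toList <+: s.drop j
  · rw [if_pos (hcond.mpr hp), if_pos hp]
  · rw [if_neg (fun hc => hp (hcond.mp hc)), if_neg hp]

theorem main_loop_eq (s : List Char) (te : String) :
    ∀ (kk k : Nat), kk = s.length + 1 - k →
      pvFindLoopA s te k =
        (PySem.List.pyRange (k : Int) ((s.length : Int) - (te.toList.length : Int) + 1) 1).filterMap (pvSelB s te) := by
  intro kk
  induction kk using Nat.strong_induction_on with
  | _ kk IH =>
    intro k hkk
    rw [pvFindLoopA]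
    by_cases hk : s.length < k
    · rw [dif_pos (pvFindFrom_past_end s te.toList k hk)]
      rw [PySem.List.pyRange_one_eq_nil (by omega : ((s.length : Int) - (te.toList.length : Int) + 1) ≤ (k : Int))]
      simp
    · rw [not_lt] at hk
      by_cases hidx : PySem.Chars.findFrom s te.toList (k : Int) none = -1
      · rw [dif_pos hidx]
        have hninf : ¬ te.toList <:+: s.drop k :=
          (PySem.Chars.findFrom_natCast_eq_neg_one_iff s te.toList k hk).mp hidx
        symm
        rw [List.filterMap_eq_nil_iff]
        intro i hi
        obtain ⟨hi1, hi2⟩ := PySem.List.mem_pyRange_one.mp hi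
        have hi0 : i = ((i.toNat : Nat) : Int) := by omega
        rw [hi0, pvSelB_natCast]
        rw [if_neg]
        intro hpre
        apply hninf
        have hki : k ≤ i.toNat := by omega
        have hdd : s.drop i.toNat = (s.drop k).drop (i.toNat - k) := by
          rw [List.drop_drop]; congr 1; omega
        rw [hdd] at hpre
        exact hpre.isInfix.trans (List.drop_suffix _ _).isInfix
      · rw [dif_neg hidx]
        obtain ⟨hb1, hb2⟩ := pvFindFrom_bounds s te.toList k hk hidx
        obtain ⟨hs1, hs2, hs3⟩ := PySem.Chars.findFrom_natCast_spec s te.toList k hk hidx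
        set r := PySem.Chars.findFrom s te.toList (k : Int) none with hr
        have hr0 : r = ((r.toNat : Nat) : Int) := by omega
        have hlt : ((r.toNat : Nat) : Int) < (s.length : Int) - (te.toList.length : Int) + 1 := by omega
        rw [PySem.List.pyRange_one_append (k : Int) ((r.toNat : Nat) : Int) _ (by omega) (by omega)]
        rw [PySem.List.pyRange_one_cons hlt]
        rw [List.filterMap_append]
        have hfirst : List.filterMap (pvSelB s te) (PySem.List.pyRange (k : Int) ((r.toNat : Nat) : Int) 1) = [] := by
          rw [List.filterMap_eq_nil_iff]
          intro i hi
          obtain ⟨hi1, hi2⟩ := PySem.List.mem_pyRange_one.mp hi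
          have hi0 : i = ((i.toNat : Nat) : Int) := by omega
          rw [hi0, pvSelB_natCast, if_neg]
          exact hs3 i.toNat (by omega) (by omega)
        rw [hfirst]
        rw [List.filterMap_cons]
        rw [pvSelB_natCast, if_pos hs2]
        have hrec := IH (s.length + 1 - (r.toNat + 1)) (by omega) (r.toNat + 1) rfl
        have hcast : (((r.toNat + 1 : Nat)) : Int) = ((r.toNat : Nat) : Int) + 1 := by push_cast; ring
        rw [hcast] at hrec
        rw [hrec, hr0]
        simp only [Int.toNat_natCast, List.nil_append]

-- ===== VERDICT (by name: the statement is the Claim_ definition above) =====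
theorem find_transposons_spec : Claim_equal_find_transposons := by
  intro sequence transposons _
  unfold Spec_find_transposons find_transposons find_transposons_alt
  rw [PySem.List.foldl_append_eq_flatMap]
  rw [List.nil_append]
  apply List.flatMap_congr
  intro te _
  have := main_loop_eq sequence.toList te (sequence.toList.length + 1 - 0) 0 rfl
  simpa using this
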